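-- pv_equiv track=rewrite | github.com/shwetha729/quantum-go-fish | game.py | consistent_distributions
-- ===== SOURCE A (Python) =====
-- from typing import Dict, Iterator, List, Tuple, Union
--
-- def consistent_distributions(num_cards: int,
--                              upper_bound: List[int],
--                              distribution_so_far: Tuple[int, ...] = tuple(),
--                              ) -> Iterator[Tuple[int, ...]]:
--   """Iterator over all distributions of `num_cards` identical cards among
--   players, subject to the constraint that player p not get more than
--   `upper_bound[p]` cards.
--
--   Arguments:
--     * num_cards: Int, the number of cards to distribute.
--     * upper_bound: List[Int], the p-th entry is the maximum number player p can
--       be assigned.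
--
--   Yields:
--     Tuples where the p-the entry is the number of cards player p gets.
--   """
--
--   curr_player = len(distribution_so_far)
--   if sum(upper_bound[curr_player:]) < num_cards:
--     # There are too many cards to distribute given the remaining upper bounds.
--     return
--
--   if len(upper_bound) == curr_player:
--     # We've distributed all the cards to the players.
--     yield distribution_so_far
--   else:
--     min_cards_to_curr_player = max(
--         0, num_cards - sum(upper_bound[curr_player + 1:]))
--     max_cards_to_curr_player = min(num_cards, upper_bound[curr_player])
--     for i in range(min_cards_to_curr_player, max_cards_to_curr_player + 1):
--       # Assign `i` cards to the current player.
--       for distribution in consistent_distributions(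
--           num_cards - i, upper_bound, distribution_so_far + (i,)):
--         yield distribution
-- ===== SOURCE B (Python) =====
-- def consistent_distributions(num_cards, upper_bound, distribution_so_far=tuple()):
--   """Iterative breadth-first enumeration: a suffix-sum table plus one pass per
--   player over a frontier of partial (prefix, remaining) states, no recursion."""
--   n = len(upper_bound)
--   curr = len(distribution_so_far)
--   suffix = [0]
--   for u in reversed(upper_bound):
--     suffix.append(u + suffix[-1])
--   suffix.reverse()
--   if curr > n or suffix[curr] < num_cards:
--     return
--   frontier = [(distribution_so_far, num_cards)]
--   for p in range(curr, n):
--     nxt = []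
--     for prefix, rem in frontier:
--       lo = max(0, rem - suffix[p + 1])
--       hi = min(rem, upper_bound[p])
--       for i in range(lo, hi + 1):
--         nxt.append((prefix + (i,), rem - i))
--     frontier = nxt
--   for prefix, _ in frontier:
--     yield prefix
-- ===== Notes on version B (the rewrite author's own statement) =====
-- stated objective: alternative
-- what changed: B replaces A's recursive generator (DFS with per-node slice sums) by an iterative breadth-first sweep: it precomputes a suffix-sum table, then processes the players one layer at a time, expanding a frontier list of (prefix, remaining) partial states; there is no recursion and leaf pruning disappears (the layer bounds make every surviving state valid).
import Mathlib
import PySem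

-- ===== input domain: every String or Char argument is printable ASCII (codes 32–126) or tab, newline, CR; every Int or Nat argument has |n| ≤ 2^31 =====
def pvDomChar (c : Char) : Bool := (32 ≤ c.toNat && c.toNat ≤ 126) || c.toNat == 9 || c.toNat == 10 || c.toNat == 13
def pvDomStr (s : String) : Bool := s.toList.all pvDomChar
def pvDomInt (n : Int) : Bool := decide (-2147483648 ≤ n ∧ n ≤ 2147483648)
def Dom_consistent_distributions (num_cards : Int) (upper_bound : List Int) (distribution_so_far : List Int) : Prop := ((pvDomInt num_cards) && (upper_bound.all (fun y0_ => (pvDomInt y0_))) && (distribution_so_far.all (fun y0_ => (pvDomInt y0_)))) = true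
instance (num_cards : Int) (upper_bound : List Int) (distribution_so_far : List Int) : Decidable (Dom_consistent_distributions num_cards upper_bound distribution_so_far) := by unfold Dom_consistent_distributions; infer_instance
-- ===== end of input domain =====

-- B replaces A's recursive DFS generator by an iterative breadth-first sweep over a frontier of
-- (prefix, remaining) partial states with a precomputed suffix-sum table; same yielded list.

-- ===== PORT A =====
def consistent_distributions (num_cards : Int) (upper_bound : List Int) (distribution_so_far : List Int) : List (List Int) :=
  let curr := distribution_so_far.length
  if (PySem.List.slice upper_bound (some (curr : Int)) none).sum < num_cards then
    []
  else if upper_bound.length = curr then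
    [distribution_so_far]
  else
    match h : PySem.List.pyGet? upper_bound (curr : Int) with
    | none => []  -- Python raises IndexError here (excluded by Pre_)
    | some ubc =>
      let minc := max 0 (num_cards - (PySem.List.slice upper_bound (some ((curr : Int) + 1)) none).sum)
      let maxc := min num_cards ubc
      (PySem.List.pyRange minc (maxc + 1) 1).foldl
        (fun acc i => acc ++ consistent_distributions (num_cards - i) upper_bound (distribution_so_far ++ [i])) []
termination_by upper_bound.length + 1 - distribution_so_far.length
decreasing_by
  have hlt : distribution_so_far.length < upper_bound.length := by
    rw [PySem.List.pyGet?_natCast] at h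
    exact List.getElem?_eq_some_iff.mp h |>.1
  simp only [List.length_append, List.length_cons, List.length_nil]
  omega

-- ===== PORT B =====
-- one layer of B's sweep: extend every frontier state by every legal count for player p
def cdStep (upper_bound suffix : List Int) (F : List (List Int × Int)) (p : Int) : List (List Int × Int) :=
  F.foldl (fun nxt s =>
    let lo := max 0 (s.2 - PySem.List.pyGetD suffix (p + 1) 0)
    let hi := min s.2 (PySem.List.pyGetD upper_bound p 0)
    (PySem.List.pyRange lo (hi + 1) 1).foldl (fun nxt2 i => nxt2 ++ [(s.1 ++ [i], s.2 - i)]) nxt) []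

def consistent_distributions_alt (num_cards : Int) (upper_bound : List Int) (distribution_so_far : List Int) : List (List Int) :=
  let n := upper_bound.length
  let curr := distribution_so_far.length
  let suffix := (upper_bound.reverse.foldl (fun acc u => acc ++ [u + PySem.List.pyGetD acc (-1) 0]) [0]).reverse
  if n < curr then []  -- Python's short-circuit `curr > n or …`
  else if PySem.List.pyGetD suffix (curr : Int) 0 < num_cards then []
  else
    ((PySem.List.pyRange (curr : Int) (n : Int) 1).foldl (cdStep upper_bound suffix)
      [(distribution_so_far, num_cards)]).map Prod.fst

-- ===== PRECONDITION & SPEC =====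
-- Pre_ excludes exactly the inputs where A raises IndexError: distribution_so_far longer
-- than upper_bound together with num_cards ≤ 0 (then upper_bound[curr_player] is accessed).
def Pre_consistent_distributions (num_cards : Int) (upper_bound : List Int) (distribution_so_far : List Int) : Prop :=
  distribution_so_far.length ≤ upper_bound.length ∨ 0 < num_cards
instance (num_cards : Int) (upper_bound : List Int) (distribution_so_far : List Int) : Decidable (Pre_consistent_distributions num_cards upper_bound distribution_so_far) := by unfold Pre_consistent_distributions; infer_instance

def pvWitness_consistent_distributions : Int × List Int × List Int := (2, [1, 2], [])

def Spec_consistent_distributions (num_cards : Int) (upper_bound : List Int) (distribution_so_far : List Int) (out : List (List Int)) : Prop := out = consistent_distributions_alt num_cards upper_bound distribution_so_far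
instance (num_cards : Int) (upper_bound : List Int) (distribution_so_far : List Int) (out : List (List Int)) : Decidable (Spec_consistent_distributions num_cards upper_bound distribution_so_far out) := by unfold Spec_consistent_distributions; infer_instance

-- ===== CLAIM (what is proved, stated in full; the proofs are below) =====
def Claim_equal_consistent_distributions : Prop := ∀ (num_cards : Int) (upper_bound : List Int) (distribution_so_far : List Int), Dom_consistent_distributions num_cards upper_bound distribution_so_far → Pre_consistent_distributions num_cards upper_bound distribution_so_far → Spec_consistent_distributions num_cards upper_bound distribution_so_far (consistent_distributions num_cards upper_bound distribution_so_far)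


-- ===== LEMMAS AND PROOFS =====

-- the suffix-sum table B builds, in foldr form: sfx ub = [sum ub[0:], sum ub[1:], …, 0]
def sfx (ub : List Int) : List Int := ub.foldr (fun u acc => (u + acc.headD 0) :: acc) [0]

lemma sfx_cons (u : Int) (t : List Int) : sfx (u :: t) = (u + (sfx t).headD 0) :: sfx t := rfl

lemma sfx_head? (ub : List Int) : (sfx ub).head? = some ub.sum := by
  induction ub with
  | nil => rfl
  | cons u t ih => simp [sfx_cons, List.headD_eq_head?_getD, ih]

lemma sfx_getD (ub : List Int) : ∀ (p : Nat), p ≤ ub.length → (sfx ub).getD p 0 = (ub.drop p).sum := by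
  induction ub with
  | nil =>
    intro p hp
    have : p = 0 := by simpa using hp
    subst this; rfl
  | cons u t ih =>
    intro p hp
    cases p with
    | zero => simp [sfx_cons, sfx_head?]
    | succ q =>
      simp only [sfx_cons, List.getD_cons_succ, List.drop_succ_cons]
      exact ih q (by simpa using hp)

lemma sfx_pyGetD (ub : List Int) (p : Nat) (hp : p ≤ ub.length) :
    PySem.List.pyGetD (sfx ub) (p : Int) 0 = (ub.drop p).sum := by
  rw [PySem.List.pyGetD_natCast]
  exact sfx_getD ub p hp

-- B builds the table back-to-front with appends and reverses it at the end; same table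
lemma revbuild_eq (ub : List Int) :
    ub.reverse.foldl (fun acc u => acc ++ [u + PySem.List.pyGetD acc (-1) 0]) [0] = (sfx ub).reverse := by
  induction ub with
  | nil => rfl
  | cons u t ih =>
    rw [List.reverse_cons, List.foldl_append, ih]
    have hne : (sfx t).reverse ≠ [] := by
      intro hnil
      have h1 := sfx_head? t
      have : sfx t = [] := by simpa using hnil
      rw [this] at h1
      simp at h1
    have hlast : ((sfx t).reverse).getLast hne = t.sum := by
      have h2 : ((sfx t).reverse).getLast? = some t.sum := by
        rw [List.getLast?_reverse, sfx_head? t]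
      rw [List.getLast?_eq_some_getLast hne] at h2
      exact Option.some.inj h2
    have hpg : PySem.List.pyGetD (sfx t).reverse (-1) 0 = t.sum := by
      rw [PySem.List.pyGetD_neg_one (h := hne)]
      exact hlast
    simp only [List.foldl_cons, List.foldl_nil, sfx_cons, List.reverse_cons, hpg,
      List.headD_eq_head?_getD, sfx_head? t]
    simp

lemma flatMap_congr_mem {α β : Type} (l : List α) (f g : α → List β)
    (h : ∀ a ∈ l, f a = g a) : l.flatMap f = l.flatMap g := by
  induction l with
  | nil => rfl
  | cons a t ih =>
    simp only [List.flatMap_cons, h a (List.mem_cons_self), ih (fun x hx => h x (List.mem_cons_of_mem a hx))]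

-- one layer, as a flatMap
lemma cdStep_eq (ub sf : List Int) (F : List (List Int × Int)) (p : Int) :
    cdStep ub sf F p
      = F.flatMap (fun s =>
          (PySem.List.pyRange (max 0 (s.2 - PySem.List.pyGetD sf (p + 1) 0))
            (min s.2 (PySem.List.pyGetD ub p 0) + 1) 1).map (fun i => (s.1 ++ [i], s.2 - i))) := by
  unfold cdStep
  simp only [PySem.List.foldl_append_singleton_eq_map]
  rw [PySem.List.foldl_append_eq_flatMap]
  simp

-- unfold A once at an inner node whose prune check passes
lemma A_node (ub pre : List Int) (num : Int) (hlt : pre.length < ub.length)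
    (hpr : ¬ ((ub.drop pre.length).sum < num)) :
    consistent_distributions num ub pre
      = (PySem.List.pyRange (max 0 (num - (ub.drop (pre.length + 1)).sum))
          (min num (ub.getD pre.length 0) + 1) 1).flatMap
          (fun i => consistent_distributions (num - i) ub (pre ++ [i])) := by
  rw [consistent_distributions]
  rw [PySem.List.slice_from_natCast]
  rw [if_neg hpr, if_neg (by omega)]
  have hget : PySem.List.pyGet? ub ((pre.length : Nat) : Int) = some ub[pre.length] := by
    rw [PySem.List.pyGet?_natCast]; exact List.getElem?_eq_getElem hlt
  split
  · next heq => rw [hget] at heq; cases heq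
  · next ubc heq =>
    rw [hget] at heq
    injection heq with heq'
    subst heq'
    rw [PySem.List.foldl_append_eq_flatMap, List.nil_append]
    have hcast : ((pre.length : Int) + 1) = ((pre.length + 1 : Nat) : Int) := by push_cast; ring
    rw [hcast, PySem.List.slice_from_natCast, List.getD_eq_getElem _ _ hlt]

-- the breadth-first sweep from layer p equals A's DFS summed over the frontier
lemma layers (ub : List Int) : ∀ (k p : Nat) (F : List (List Int × Int)), p + k = ub.length →
    (∀ s ∈ F, s.1.length = p ∧ s.2 ≤ (ub.drop p).sum) →
    ((PySem.List.pyRange (p : Int) (ub.length : Int) 1).foldl (cdStep ub (sfx ub)) F).map Prod.fst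
      = F.flatMap (fun s => consistent_distributions s.2 ub s.1) := by
  intro k
  induction k with
  | zero =>
    intro p F hk hinv
    have hp : p = ub.length := by omega
    subst hp
    rw [PySem.List.pyRange_one_eq_nil le_rfl, List.foldl_nil]
    induction F with
    | nil => rfl
    | cons s t ih =>
      have hs := hinv s (List.mem_cons_self)
      have hd : (PySem.List.slice ub (some ((s.1.length : Nat) : Int)) none).sum = 0 := by
        rw [PySem.List.slice_from_natCast, hs.1, List.drop_length]; rfl
      have hs2 : s.2 ≤ 0 := by
        have h2 := hs.2
        rwa [List.drop_length, List.sum_nil] at h2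
      have hA : consistent_distributions s.2 ub s.1 = [s.1] := by
        rw [consistent_distributions, hd, if_neg (by omega), if_pos hs.1.symm]
      simp only [List.map_cons, List.flatMap_cons, hA]
      rw [ih (fun x hx => hinv x (List.mem_cons_of_mem s hx))]
      rfl
  | succ k ih =>
    intro p F hk hinv
    have hlt : p < ub.length := by omega
    rw [PySem.List.pyRange_one_cons (by exact_mod_cast hlt), List.foldl_cons]
    have hcast : ((p : Int) + 1) = ((p + 1 : Nat) : Int) := by push_cast; ring
    have hsub : PySem.List.pyGetD (sfx ub) ((p : Int) + 1) 0 = (ub.drop (p + 1)).sum := by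
      rw [hcast]; exact sfx_pyGetD ub (p + 1) (by omega)
    have hub : PySem.List.pyGetD ub (p : Int) 0 = ub[p] := by
      rw [PySem.List.pyGetD_natCast, List.getD_eq_getElem _ _ hlt]
    have hinv' : ∀ s ∈ cdStep ub (sfx ub) F (p : Int),
        s.1.length = p + 1 ∧ s.2 ≤ (ub.drop (p + 1)).sum := by
      intro s hs
      rw [cdStep_eq] at hs
      obtain ⟨t, htF, hst⟩ := List.mem_flatMap.mp hs
      obtain ⟨i, hi, hsi⟩ := List.mem_map.mp hst
      have hibd := (PySem.List.mem_pyRange_one.mp hi).1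
      have ht := hinv t htF
      subst hsi
      constructor
      · simp [ht.1]
      · simp only at *
        rw [hsub] at hibd
        omega
    have hmid : (p : Int) + 1 = ((p + 1 : Nat) : Int) := hcast
    rw [hmid, ih (p + 1) (cdStep ub (sfx ub) F (p : Int)) (by omega) hinv']
    rw [cdStep_eq, List.flatMap_assoc]
    apply flatMap_congr_mem
    intro s hsF
    have hs := hinv s hsF
    rw [List.flatMap_map]
    rw [hsub, hub]
    rw [A_node ub s.1 s.2 (by omega) (by rw [hs.1]; omega)]
    rw [hs.1, List.getD_eq_getElem _ _ hlt]

lemma equal_on_pre (num_cards : Int) (upper_bound distribution_so_far : List Int)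
    (hpre : Pre_consistent_distributions num_cards upper_bound distribution_so_far) :
    consistent_distributions num_cards upper_bound distribution_so_far
      = consistent_distributions_alt num_cards upper_bound distribution_so_far := by
  unfold consistent_distributions_alt
  rw [revbuild_eq, List.reverse_reverse]
  by_cases hle : distribution_so_far.length ≤ upper_bound.length
  · rw [if_neg (by omega)]
    rw [sfx_pyGetD upper_bound distribution_so_far.length hle]
    by_cases hpr : (upper_bound.drop distribution_so_far.length).sum < num_cards
    · rw [if_pos hpr, consistent_distributions]
      rw [PySem.List.slice_from_natCast, if_pos hpr]
    · rw [if_neg hpr]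
      have := layers upper_bound (upper_bound.length - distribution_so_far.length)
        distribution_so_far.length [(distribution_so_far, num_cards)] (by omega)
        (by intro s hs; simp at hs; subst hs; exact ⟨rfl, by omega⟩)
      rw [this]
      simp
  · have hnum : 0 < num_cards := by
      rcases hpre with h | h
      · exact absurd h hle
      · exact h
    rw [if_pos (by omega), consistent_distributions]
    rw [if_pos (by
      rw [PySem.List.slice_from_natCast, List.drop_eq_nil_of_le (by omega)]
      simpa using hnum)]

-- ===== VERDICT (by name: the statement is the Claim_ definition above) =====
theorem consistent_distributions_spec : Claim_equal_consistent_distributions := by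
  intro num ub dist _ hpre
  unfold Spec_consistent_distributions
  exact equal_on_pre num ub dist hpre
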